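-- pv_equiv track=rewrite | github.com/SedaMirzoyan/Python_course | Searching/Binary_and_linear_search/binary_search_last_match_pattern.py | find_last_match
-- ===== SOURCE A (Python) =====
-- def find_last_match(input_str, pattern):
--     for i in range(len(input_str)-1, 1, -1):
--         ind = 0
--         if (input_str[i] == pattern[0]):
--             for j in range(0, len(pattern)):
--                 if(input_str[i:i+len(pattern)] == pattern[j:j+len(pattern)]):
--                     ind = i + 1
--                     break
--             if (ind != 0):
--                 break
--
--     return ind
-- ===== SOURCE B (Python) =====
-- def find_last_match(input_str, pattern):
--     first = pattern[0]
--     last = -1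
--     for i in range(len(input_str) - len(pattern) + 1):
--         if input_str[i] == first and input_str.startswith(pattern, i):
--             last = i
--     return last + 1
-- ===== Notes on version B (the rewrite author's own statement) =====
-- stated objective: faster
-- what changed: A scans backward from the top and at each position runs an inner loop comparing up to len(pattern) slice pairs; B is a single forward pass with a first-character fast check and one startswith per candidate, keeping the last match index in an accumulator.
-- intended difference: Where a truncated tail slice of input_str equals the same-length suffix of pattern (A counts it as a match and returns that position+1) or where the only genuine occurrence of pattern starts at index 0 or 1 (A's range stops at 2 and returns 0), B returns last genuine occurrence + 1 (or 0 if none), the intended last-match value. — e.g. on find_last_match("abcab", "abc"): A returns 0, B returns 1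
import Mathlib
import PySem

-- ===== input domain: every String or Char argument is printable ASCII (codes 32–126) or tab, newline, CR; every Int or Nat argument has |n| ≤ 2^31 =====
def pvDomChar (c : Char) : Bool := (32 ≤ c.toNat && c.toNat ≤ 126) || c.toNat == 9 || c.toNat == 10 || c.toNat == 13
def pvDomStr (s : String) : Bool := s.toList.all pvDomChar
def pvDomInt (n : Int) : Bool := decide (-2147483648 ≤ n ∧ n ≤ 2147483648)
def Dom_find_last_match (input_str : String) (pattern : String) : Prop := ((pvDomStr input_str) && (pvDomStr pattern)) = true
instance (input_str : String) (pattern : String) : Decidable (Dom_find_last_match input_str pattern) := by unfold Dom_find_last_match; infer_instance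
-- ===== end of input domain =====

-- B replaces A's backward O(n*m^2) slice-comparing double loop by one forward pass keeping the
-- last occurrence (first-char fast check + startswith); A = B proved outside D_ (A's truncated-
-- tail pseudo-matches and its blindness to occurrences at index 0/1), with a difference witness
-- and A ≠ B proved everywhere inside D_.


-- ===== PORT A =====
-- inner 'for j in range(0, len(pattern))' with break (result: i+1 on first matching j, else 0)
def pyA_inner (s p : List Char) (i : Int) : List Int → Int
  | [] => 0
  | j :: js =>
    if PySem.List.slice s (some i) (some (i + (p.length : Int))) =
       PySem.List.slice p (some j) (some (j + (p.length : Int))) then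
      i + 1
    else pyA_inner s p i js

-- outer 'for i in range(len(input_str)-1, 1, -1)' with break; returns last 'ind' (0 at natural end)
def pyA_outer (s p : List Char) : List Int → Int
  | [] => 0
  | i :: is =>
    if PySem.List.pyGet? s i = PySem.List.pyGet? p 0 then
      let ind := pyA_inner s p i (PySem.List.pyRange 0 (p.length : Int) 1)
      if ind ≠ 0 then ind else pyA_outer s p is
    else pyA_outer s p is

def find_last_match (input_str : String) (pattern : String) : Int :=
  pyA_outer input_str.toList pattern.toList
    (PySem.List.pyRange ((input_str.toList.length : Int) - 1) 1 (-1))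

-- ===== PORT B =====
-- input_str.startswith(pattern, i): exact for 0 <= i (the only i the loop produces)
def pyB_startswithAt (s p : List Char) (i : Int) : Bool :=
  p.isPrefixOf (s.drop i.toNat)

-- 'first = pattern[0]; for i in range(len(input_str)-len(pattern)+1): if input_str[i] == first
--  and input_str.startswith(pattern, i): last = i; return last + 1'
def find_last_match_alt (input_str : String) (pattern : String) : Int :=
  (PySem.List.pyRange 0 ((input_str.toList.length : Int) - (pattern.toList.length : Int) + 1) 1).foldl
    (fun last i =>
      if PySem.List.pyGet? input_str.toList i = PySem.List.pyGet? pattern.toList 0 ∧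
         pyB_startswithAt input_str.toList pattern.toList i = true then i else last)
    (-1) + 1

-- ===== PRECONDITION & SPEC =====
-- Pre_ excludes exactly the inputs where A raises: len(input_str) < 3 (loop body never runs,
-- 'ind' unbound -> UnboundLocalError) and pattern == '' (pattern[0] -> IndexError).
def Pre_find_last_match (input_str : String) (pattern : String) : Prop :=
  -- e.g. input_str "abcab" with pattern "ab" is admitted; input_str "ab" or pattern "" is not
  3 ≤ input_str.toList.length ∧ pattern.toList ≠ []
instance (input_str : String) (pattern : String) : Decidable (Pre_find_last_match input_str pattern) := by
  unfold Pre_find_last_match; infer_instance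

def pvWitness_find_last_match : String × String := ("abcab", "ab")

-- D_: where a truncated tail slice of input_str equals the matching suffix of pattern (A counts
-- it as a match and returns that position+1), or the only genuine occurrence of pattern starts
-- at index 0 or 1 (A's range stops at 2 and returns 0); B returns last genuine occurrence + 1
-- (or 0 if none), the intended last-match value.
def D_find_last_match (input_str : String) (pattern : String) : Prop :=
  -- e.g. ("abcab", "abc"): the only genuine occurrence starts at 0, A returns 0, B returns 1;
  -- ("xxxa", "aa"): the truncated tail slice "a" equals the pattern suffix "a", A returns 4, B returns 0
  (∃ i : Nat, i < input_str.toList.length ∧ 2 ≤ i ∧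
      input_str.toList.length < i + pattern.toList.length ∧
      input_str.toList[i]? = pattern.toList[0]? ∧
      input_str.toList.drop i =
        pattern.toList.drop (pattern.toList.length - (input_str.toList.length - i))) ∨
  ((∀ i : Nat, i < input_str.toList.length → 2 ≤ i →
      ¬ pattern.toList.isPrefixOf (input_str.toList.drop i)) ∧
   (pattern.toList.isPrefixOf input_str.toList ∨
    pattern.toList.isPrefixOf (input_str.toList.drop 1)))
instance (input_str : String) (pattern : String) : Decidable (D_find_last_match input_str pattern) := by
  unfold D_find_last_match; infer_instance

def Spec_find_last_match (input_str : String) (pattern : String) (out : Int) : Prop :=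
  ¬ D_find_last_match input_str pattern → out = find_last_match_alt input_str pattern
instance (input_str : String) (pattern : String) (out : Int) : Decidable (Spec_find_last_match input_str pattern out) := by
  unfold Spec_find_last_match; infer_instance

def pvDiffWitness_find_last_match : String × String := ("abcab", "abc")
def pvDiffWitnessOut_find_last_match : Int × Int := (0, 1)

-- ===== CLAIM (what is proved, stated in full; the proofs are below) =====
def Claim_unchanged_find_last_match : Prop := ∀ (input_str : String) (pattern : String), Dom_find_last_match input_str pattern → Pre_find_last_match input_str pattern → Spec_find_last_match input_str pattern (find_last_match input_str pattern)
def Claim_changed_find_last_match : Prop := Dom_find_last_match (pvDiffWitness_find_last_match.1) (pvDiffWitness_find_last_match.2) ∧ Pre_find_last_match (pvDiffWitness_find_last_match.1) (pvDiffWitness_find_last_match.2) ∧ D_find_last_match (pvDiffWitness_find_last_match.1) (pvDiffWitness_find_last_match.2) ∧ find_last_match (pvDiffWitness_find_last_match.1) (pvDiffWitness_find_last_match.2) = pvDiffWitnessOut_find_last_match.1 ∧ find_last_match_alt (pvDiffWitness_find_last_match.1) (pvDiffWitness_find_last_match.2) = pvDiffWitnessOut_find_last_match.2 ∧ pvDiffWitnessOut_find_last_match.1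 ≠ pvDiffWitnessOut_find_last_match.2
def Claim_exact_find_last_match : Prop := ∀ (input_str : String) (pattern : String), Dom_find_last_match input_str pattern → Pre_find_last_match input_str pattern → D_find_last_match input_str pattern → find_last_match input_str pattern ≠ find_last_match_alt input_str pattern
-- ===== LEMMAS AND PROOFS =====

-- first index in the scan list satisfying C (A is a descending first-hit scan)
def pvFH (C : Int → Bool) : List Int → Option Int
  | [] => none
  | i :: is => if C i then some i else pvFH C is

-- A's per-index success condition, exactly as the port tests it
def pvCA (s p : List Char) (i : Int) : Bool :=
  decide (PySem.List.pyGet? s i = PySem.List.pyGet? p 0) &&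
  (PySem.List.pyRange 0 (p.length : Int) 1).any (fun j =>
    decide (PySem.List.slice s (some i) (some (i + (p.length : Int))) =
            PySem.List.slice p (some j) (some (j + (p.length : Int)))))

-- A's truncated-tail condition (D_'s first clause, over Int indices)
def pvCT (s p : List Char) (n m : Int) (i : Int) : Bool :=
  decide (PySem.List.pyGet? s i = PySem.List.pyGet? p 0 ∧
    PySem.List.slice s (some i) none = PySem.List.slice p (some (m - (n - i))) none)

-- full-match condition (a genuine occurrence of pattern at i)
def pvCF (s p : List Char) (i : Int) : Bool := p.isPrefixOf (s.drop i.toNat)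

theorem pvFH_append (C : Int → Bool) (l1 l2 : List Int) :
    pvFH C (l1 ++ l2) = (pvFH C l1).or (pvFH C l2) := by
  induction l1 with
  | nil => simp [pvFH]
  | cons i is ih => by_cases h : C i <;> simp [pvFH, h, ih]

theorem pvFH_congr (C C' : Int → Bool) (l : List Int) (h : ∀ i ∈ l, C i = C' i) :
    pvFH C l = pvFH C' l := by
  induction l with
  | nil => rfl
  | cons i is ih =>
    simp only [pvFH, h i (by simp)]
    split
    · rfl
    · exact ih fun j hj => h j (by simp [hj])

theorem pvFH_eq_none_iff (C : Int → Bool) (l : List Int) :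
    pvFH C l = none ↔ ∀ i ∈ l, C i = false := by
  induction l with
  | nil => simp [pvFH]
  | cons i is ih => by_cases h : C i <;> simp [pvFH, h, ih]

theorem pvFH_mem (C : Int → Bool) (l : List Int) (i : Int) (h : pvFH C l = some i) :
    i ∈ l ∧ C i = true := by
  induction l with
  | nil => simp [pvFH] at h
  | cons a as ih =>
    by_cases ha : C a
    · simp [pvFH, ha] at h; subst h; simp [ha]
    · simp [pvFH, ha] at h
      have := ih h
      exact ⟨by simp [this.1], this.2⟩

theorem pyA_inner_eq (s p : List Char) (i : Int) (l : List Int) :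
    pyA_inner s p i l =
      if l.any (fun j => decide (PySem.List.slice s (some i) (some (i + (p.length : Int))) =
            PySem.List.slice p (some j) (some (j + (p.length : Int))))) then i + 1 else 0 := by
  induction l with
  | nil => simp [pyA_inner]
  | cons j js ih =>
    by_cases h : PySem.List.slice s (some i) (some (i + (p.length : Int))) =
        PySem.List.slice p (some j) (some (j + (p.length : Int))) <;>
      simp [pyA_inner, h, ih]

theorem pyA_outer_eq (s p : List Char) (l : List Int) (hl : ∀ i ∈ l, 1 < i) :
    pyA_outer s p l = match pvFH (pvCA s p) l with
      | some i => i + 1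
      | none => 0 := by
  induction l with
  | nil => rfl
  | cons i is ih =>
    have hi : 1 < i := hl i (by simp)
    have ih' := ih fun j hj => hl j (by simp [hj])
    by_cases hg : PySem.List.pyGet? s i = PySem.List.pyGet? p 0
    · by_cases ha : (PySem.List.pyRange 0 (p.length : Int) 1).any (fun j =>
          decide (PySem.List.slice s (some i) (some (i + (p.length : Int))) =
                  PySem.List.slice p (some j) (some (j + (p.length : Int))))) = true
      · simp [pyA_outer, hg, pyA_inner_eq, ha, pvFH, pvCA]
        omega
      · simp [pyA_outer, hg, pyA_inner_eq, ha, pvFH, pvCA, ih']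
    · simp [pyA_outer, hg, pvFH, pvCA, ih']

-- the forward accumulator loop returns the LAST index satisfying C (= first hit of the reversed scan)
theorem fold_last {C : Int → Prop} [DecidablePred C] (l : List Int) (acc : Int) :
    l.foldl (fun last i => if C i then i else last) acc
      = (pvFH (fun i => decide (C i)) l.reverse).getD acc := by
  induction l generalizing acc with
  | nil => rfl
  | cons i is ih =>
    rw [List.foldl_cons, ih, List.reverse_cons, pvFH_append]
    cases h : pvFH (fun j => decide (C j)) is.reverse with
    | some j => simp [Option.or, h]
    | none => by_cases hc : C i <;> simp [Option.or, pvFH, h, hc]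

theorem pyRange_neg_one_split (a b c : Int) (h1 : c ≤ b) (h2 : b ≤ a) :
    PySem.List.pyRange a c (-1) = PySem.List.pyRange a b (-1) ++ PySem.List.pyRange b c (-1) := by
  rw [PySem.List.pyRange_neg_one_eq_reverse, PySem.List.pyRange_neg_one_eq_reverse,
      PySem.List.pyRange_neg_one_eq_reverse,
      PySem.List.pyRange_one_append (c + 1) (b + 1) (a + 1) (by omega) (by omega),
      List.reverse_append]

-- ===== the condition crunch =====

theorem exists_j_iff (s p : List Char) (k : Nat) (_hm : 0 < p.length) :
    ((PySem.List.pyRange 0 (p.length : Int) 1).any (fun j =>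
      decide (PySem.List.slice s (some (k : Int)) (some ((k : Int) + (p.length : Int))) =
              PySem.List.slice p (some j) (some (j + (p.length : Int))))) = true) ↔
    ∃ jn : Nat, jn < p.length ∧ (s.drop k).take p.length = p.drop jn := by
  rw [List.any_eq_true]
  constructor
  · rintro ⟨j, hj, heq⟩
    rw [PySem.List.mem_pyRange_one] at hj
    refine ⟨j.toNat, by omega, ?_⟩
    rw [decide_eq_true_eq] at heq
    rw [show j = (j.toNat : Int) by omega] at heq
    rw [PySem.List.slice_natCast_add, PySem.List.slice_natCast_add] at heq
    rw [heq, List.take_of_length_le (by simp)]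
  · rintro ⟨jn, hjn, heq⟩
    refine ⟨(jn : Int), by rw [PySem.List.mem_pyRange_one]; omega, ?_⟩
    rw [decide_eq_true_eq, PySem.List.slice_natCast_add, PySem.List.slice_natCast_add,
        List.take_of_length_le (l := p.drop jn) (by simp)]
    exact heq

theorem cond_tail_eq (s p : List Char) (i : Int) (h1 : 1 < i) (h2 : i < (s.length : Int))
    (h3 : (s.length : Int) < i + (p.length : Int)) :
    pvCA s p i = pvCT s p (s.length : Int) (p.length : Int) i := by
  set k := i.toNat with hk
  have hik : i = (k : Int) := by omega
  have hkn : k < s.length := by omega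
  have hnm : s.length < k + p.length := by omega
  have hm : 0 < p.length := by omega
  have htake : (s.drop k).take p.length = s.drop k :=
    List.take_of_length_le (by simp; omega)
  have hcast : (p.length : Int) - ((s.length : Int) - (k : Int)) = ((p.length - (s.length - k) : Nat) : Int) := by
    omega
  unfold pvCA pvCT
  rw [hik, hcast, PySem.List.slice_from_natCast, PySem.List.slice_from_natCast]
  rw [Bool.eq_iff_iff]
  simp only [Bool.and_eq_true, decide_eq_true_eq]
  rw [exists_j_iff s p k hm]
  constructor
  · rintro ⟨hg, jn, hjn, heq⟩
    rw [htake] at heq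
    have hlen : s.length - k = p.length - jn := by
      have := congrArg List.length heq; simp at this; omega
    refine ⟨hg, ?_⟩
    rw [heq]
    congr 1
    omega
  · rintro ⟨hg, heq⟩
    exact ⟨hg, p.length - (s.length - k), by omega, by rw [htake, heq]⟩

theorem cond_full_eq (s p : List Char) (i : Int) (h1 : 1 < i) (hm : 0 < p.length)
    (h2 : i + (p.length : Int) ≤ (s.length : Int)) :
    pvCA s p i = pvCF s p i := by
  set k := i.toNat with hk
  have hik : i = (k : Int) := by omega
  have hkm : k + p.length ≤ s.length := by omega
  unfold pvCA pvCF
  rw [hik, Bool.eq_iff_iff]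
  simp only [Bool.and_eq_true, decide_eq_true_eq, Int.toNat_natCast]
  rw [exists_j_iff s p k hm]
  have hlen : ((s.drop k).take p.length).length = p.length := by simp; omega
  rw [List.isPrefixOf_iff_prefix, List.prefix_iff_eq_take]
  constructor
  · rintro ⟨-, jn, hjn, heq⟩
    have : p.length - jn = p.length := by
      have := congrArg List.length heq; simp at this ⊢; omega
    have hjn0 : jn = 0 := by omega
    rw [hjn0, List.drop_zero] at heq
    exact heq.symm
  · intro heq
    refine ⟨?_, 0, hm, by rw [List.drop_zero]; exact heq.symm⟩
    have h0 : p[0]? = (s.drop k)[0]? := by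
      rw [heq, List.getElem?_take_of_lt hm]
    rw [PySem.List.pyGet?_natCast, show (0 : Int) = ((0 : Nat) : Int) by rfl,
        PySem.List.pyGet?_natCast, h0, List.getElem?_drop]
    simp

theorem cond_full_false (s p : List Char) (i : Int) (hm : 0 < p.length)
    (h2 : (s.length : Int) < i + (p.length : Int)) :
    pvCF s p i = false := by
  unfold pvCF
  rw [Bool.eq_false_iff, Ne, List.isPrefixOf_iff_prefix]
  intro hpre
  have := hpre.length_le
  simp at this
  omega

-- pvCT at a tail position is exactly D_'s first clause at i.toNat
theorem pvCT_iff (s p : List Char) (i : Int) (h2 : 2 ≤ i) (hlt : i < (s.length : Int))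
    (hov : (s.length : Int) < i + (p.length : Int)) :
    pvCT s p (s.length : Int) (p.length : Int) i = true ↔
      (s[i.toNat]? = p[0]? ∧ s.drop i.toNat = p.drop (p.length - (s.length - i.toNat))) := by
  set k := i.toNat with hk
  have hik : i = (k : Int) := by omega
  have hcast : (p.length : Int) - ((s.length : Int) - (k : Int)) = ((p.length - (s.length - k) : Nat) : Int) := by
    omega
  unfold pvCT
  rw [hik, hcast, PySem.List.slice_from_natCast, PySem.List.slice_from_natCast,
      decide_eq_true_eq, PySem.List.pyGet?_natCast,
      show (0 : Int) = ((0 : Nat) : Int) by rfl, PySem.List.pyGet?_natCast]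

-- a genuine occurrence needs room: pvCF true forces i.toNat + p.length ≤ s.length
theorem pvCF_le (s p : List Char) (i : Int) (hm : 0 < p.length) (h : pvCF s p i = true) :
    (i.toNat : Int) + (p.length : Int) ≤ (s.length : Int) := by
  have := (List.isPrefixOf_iff_prefix.1 h).length_le
  simp at this
  omega

-- A, rewritten as: first tail pseudo-match above b, else the last genuine occurrence in (1, b], else 0
theorem A_characterized (s p : List Char) (hn : 3 ≤ s.length) (hp : p ≠ []) :
    pyA_outer s p (PySem.List.pyRange ((s.length : Int) - 1) 1 (-1)) =
      (match pvFH (pvCT s p (s.length : Int) (p.length : Int))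
          (PySem.List.pyRange ((s.length : Int) - 1) (max 1 ((s.length : Int) - (p.length : Int))) (-1)) with
        | some i => i + 1
        | none =>
          match pvFH (pvCF s p)
              (PySem.List.pyRange (max 1 ((s.length : Int) - (p.length : Int))) 1 (-1)) with
            | some i => i + 1
            | none => 0) := by
  have hm : 0 < p.length := List.length_pos_of_ne_nil hp
  set n : Int := (s.length : Int) with hndef
  set m : Int := (p.length : Int) with hmdef
  set b : Int := max 1 (n - m) with hbdef
  have hbc : b = 1 ∨ b = n - m := (max_choice 1 (n - m)).imp id id
  have hb1 : 1 ≤ b := le_max_left _ _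
  have hbnm : n - m ≤ b := le_max_right _ _
  have hbn : b ≤ n - 1 := by rcases hbc with h | h <;> omega
  rw [pyA_outer_eq s p _ (fun i hi => by
        rw [PySem.List.mem_pyRange_neg_one] at hi; omega),
      pyRange_neg_one_split (n - 1) b 1 hb1 hbn, pvFH_append,
      pvFH_congr (pvCA s p) (pvCT s p n m) (PySem.List.pyRange (n - 1) b (-1)) (fun i hi => by
        rw [PySem.List.mem_pyRange_neg_one] at hi
        exact cond_tail_eq s p i (by omega) (by omega) (by omega)),
      pvFH_congr (pvCA s p) (pvCF s p) (PySem.List.pyRange b 1 (-1)) (fun i hi => by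
        rw [PySem.List.mem_pyRange_neg_one] at hi
        exact cond_full_eq s p i (by omega) hm (by rcases hbc with h | h <;> omega))]
  cases h1 : pvFH (pvCT s p n m) (PySem.List.pyRange (n - 1) b (-1)) <;> simp [Option.or]

-- a genuine occurrence starting at i ≥ 0 begins with pattern's first character
theorem first_of_prefix (s p : List Char) (i : Int) (hm : 0 < p.length) (h0 : 0 ≤ i)
    (hpre : p.isPrefixOf (s.drop i.toNat) = true) :
    PySem.List.pyGet? s i = PySem.List.pyGet? p 0 := by
  set k := i.toNat with hk
  have hik : i = (k : Int) := by omega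
  have heq : p = (s.drop k).take p.length :=
    List.prefix_iff_eq_take.1 (List.isPrefixOf_iff_prefix.1 hpre)
  have h0' : p[0]? = (s.drop k)[0]? := by
    rw [heq, List.getElem?_take_of_lt hm]
  rw [hik, PySem.List.pyGet?_natCast, show (0 : Int) = ((0 : Nat) : Int) by rfl,
      PySem.List.pyGet?_natCast, h0', List.getElem?_drop]
  simp

-- B, rewritten as the same genuine-occurrence scan (first hit of the descending full range)
theorem B_characterized (s p : List Char) (hp : p ≠ []) :
    (PySem.List.pyRange 0 ((s.length : Int) - (p.length : Int) + 1) 1).foldl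
      (fun last i =>
        if PySem.List.pyGet? s i = PySem.List.pyGet? p 0 ∧
           pyB_startswithAt s p i = true then i else last) (-1) + 1
    = (match pvFH (pvCF s p) (PySem.List.pyRange ((s.length : Int)) (-1) (-1)) with
        | some i => i + 1
        | none => 0) := by
  have hm : 0 < p.length := List.length_pos_of_ne_nil hp
  rw [fold_last,
      show (PySem.List.pyRange 0 ((s.length : Int) - (p.length : Int) + 1) 1).reverse
          = PySem.List.pyRange ((s.length : Int) - (p.length : Int)) (-1) (-1) by
        rw [PySem.List.pyRange_neg_one_eq_reverse]; norm_num,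
      pvFH_congr _ (pvCF s p) _ (fun i hi => by
        rw [PySem.List.mem_pyRange_neg_one] at hi
        by_cases hcf : p.isPrefixOf (s.drop i.toNat) = true
        · simp [pvCF, pyB_startswithAt, hcf, first_of_prefix s p i hm (by omega) hcf]
        · simp [pvCF, pyB_startswithAt, hcf])]
  have hext : pvFH (pvCF s p) (PySem.List.pyRange ((s.length : Int)) (-1) (-1))
      = pvFH (pvCF s p) (PySem.List.pyRange ((s.length : Int) - (p.length : Int)) (-1) (-1)) := by
    by_cases hnm : 0 ≤ (s.length : Int) - (p.length : Int)
    · rw [pyRange_neg_one_split ((s.length : Int)) ((s.length : Int) - (p.length : Int)) (-1)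
          (by omega) (by omega), pvFH_append,
        (pvFH_eq_none_iff _ _).2 (fun i hi => by
          rw [PySem.List.mem_pyRange_neg_one] at hi
          exact cond_full_false s p i hm (by omega)),
        Option.none_or]
    · rw [(pvFH_eq_none_iff _ _).2 (fun i hi => by
          rw [PySem.List.mem_pyRange_neg_one] at hi
          exact cond_full_false s p i hm (by omega)),
        PySem.List.pyRange_neg_one_eq_nil (by omega)]
      rfl
  rw [hext]
  cases h : pvFH (pvCF s p) (PySem.List.pyRange ((s.length : Int) - (p.length : Int)) (-1) (-1)) <;> simp

-- ===== VERDICT proofs =====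

theorem main_unchanged (s p : List Char) (hn : 3 ≤ s.length) (hp : p ≠ [])
    (hD : ¬ ((∃ i : Nat, i < s.length ∧ 2 ≤ i ∧ s.length < i + p.length ∧
          s[i]? = p[0]? ∧ s.drop i = p.drop (p.length - (s.length - i))) ∨
        ((∀ i : Nat, i < s.length → 2 ≤ i → ¬ p.isPrefixOf (s.drop i)) ∧
         (p.isPrefixOf s ∨ p.isPrefixOf (s.drop 1))))) :
    pyA_outer s p (PySem.List.pyRange ((s.length : Int) - 1) 1 (-1)) =
      (PySem.List.pyRange 0 ((s.length : Int) - (p.length : Int) + 1) 1).foldl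
      (fun last i =>
        if PySem.List.pyGet? s i = PySem.List.pyGet? p 0 ∧
           pyB_startswithAt s p i = true then i else last) (-1) + 1 := by
  have hm : 0 < p.length := List.length_pos_of_ne_nil hp
  have hD1 : ¬ ∃ i : Nat, i < s.length ∧ 2 ≤ i ∧ s.length < i + p.length ∧
      s[i]? = p[0]? ∧ s.drop i = p.drop (p.length - (s.length - i)) := fun h => hD (Or.inl h)
  have hD2 : ¬ ((∀ i : Nat, i < s.length → 2 ≤ i → ¬ p.isPrefixOf (s.drop i)) ∧
      (p.isPrefixOf s ∨ p.isPrefixOf (s.drop 1))) := fun h => hD (Or.inr h)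
  set n : Int := (s.length : Int) with hndef
  set m : Int := (p.length : Int) with hmdef
  set b : Int := max 1 (n - m) with hbdef
  have hbc : b = 1 ∨ b = n - m := (max_choice 1 (n - m)).imp id id
  have hb1 : 1 ≤ b := le_max_left _ _
  have hbnm : n - m ≤ b := le_max_right _ _
  have hbn : b ≤ n - 1 := by rcases hbc with h | h <;> omega
  rw [A_characterized s p hn hp, B_characterized s p hp]
  -- the tail scan finds nothing (¬ clause 1)
  have htail : pvFH (pvCT s p n m) (PySem.List.pyRange (n - 1) b (-1)) = none := by
    rw [pvFH_eq_none_iff]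
    intro i hi
    rw [PySem.List.mem_pyRange_neg_one] at hi
    by_contra hcon
    rw [Bool.not_eq_false, pvCT_iff s p i (by omega) (by omega) (by omega)] at hcon
    exact hD1 ⟨i.toNat, by omega, by omega, by omega, hcon.1, hcon.2⟩
  rw [htail]
  -- split B's scan: above b nothing genuine fits
  rw [show PySem.List.pyRange n (-1) (-1) =
        PySem.List.pyRange n b (-1) ++ (PySem.List.pyRange b 1 (-1) ++ PySem.List.pyRange 1 (-1) (-1)) by
      rw [← pyRange_neg_one_split b 1 (-1) (by omega) (by omega),
          ← pyRange_neg_one_split n b (-1) (by omega) (by omega)],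
      pvFH_append, pvFH_append,
      (pvFH_eq_none_iff (pvCF s p) (PySem.List.pyRange n b (-1))).2 (fun i hi => by
        rw [PySem.List.mem_pyRange_neg_one] at hi
        exact cond_full_false s p i hm (by omega)),
      Option.none_or]
  cases hmid : pvFH (pvCF s p) (PySem.List.pyRange b 1 (-1)) with
  | some i => simp [Option.or]
  | none =>
    -- no genuine occurrence at any index ≥ 2, so (¬ clause 2) kills indices 0 and 1 too
    have hall : ∀ i : Nat, i < s.length → 2 ≤ i → ¬ p.isPrefixOf (s.drop i) := by
      intro i hilt hi2 hpre
      have hfit : i + p.length ≤ s.length := by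
        have := (List.isPrefixOf_iff_prefix.1 hpre).length_le
        simp at this; omega
      have hib : (i : Int) ≤ b := by omega
      have : pvCF s p (i : Int) = false := by
        refine (pvFH_eq_none_iff _ _).1 hmid (i : Int) ?_
        rw [PySem.List.mem_pyRange_neg_one]; omega
      rw [pvCF, Int.toNat_natCast] at this
      rw [hpre] at this
      exact absurd this (by simp)
    have hl0 : ¬ p.isPrefixOf s := fun h => hD2 ⟨hall, Or.inl h⟩
    have hl1 : ¬ p.isPrefixOf (s.drop 1) := fun h => hD2 ⟨hall, Or.inr h⟩
    have h01 : pvFH (pvCF s p) (PySem.List.pyRange 1 (-1) (-1)) = none := by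
      rw [pvFH_eq_none_iff]
      intro i hi
      rw [PySem.List.mem_pyRange_neg_one] at hi
      have hcase : i = 0 ∨ i = 1 := by omega
      rcases hcase with h | h <;> subst h
      · rw [pvCF, show (0 : Int).toNat = 0 from rfl, List.drop_zero]
        exact Bool.eq_false_iff.2 hl0
      · rw [pvCF, show (1 : Int).toNat = 1 from rfl]
        exact Bool.eq_false_iff.2 hl1
    simp [Option.or, h01]

-- B's value is 0 (no genuine occurrence) or (last genuine occurrence)+1, which fits inside s
theorem B_le (s p : List Char) (hm : 0 < p.length) :
    (match pvFH (pvCF s p) (PySem.List.pyRange ((s.length : Int)) (-1) (-1)) with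
      | some i => i + 1 | none => 0) = 0 ∨
    (match pvFH (pvCF s p) (PySem.List.pyRange ((s.length : Int)) (-1) (-1)) with
      | some i => i + 1 | none => 0) ≤ (s.length : Int) - (p.length : Int) + 1 := by
  cases hfh : pvFH (pvCF s p) (PySem.List.pyRange ((s.length : Int)) (-1) (-1)) with
  | none => exact Or.inl rfl
  | some j =>
    right
    obtain ⟨hjmem, hjC⟩ := pvFH_mem _ _ _ hfh
    rw [PySem.List.mem_pyRange_neg_one] at hjmem
    have := pvCF_le s p j hm hjC
    show j + 1 ≤ (s.length : Int) - (p.length : Int) + 1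
    omega

theorem B_pos (s p : List Char) (hn : 3 ≤ s.length)
    (hlow : p.isPrefixOf s = true ∨ p.isPrefixOf (s.drop 1) = true) :
    1 ≤ (match pvFH (pvCF s p) (PySem.List.pyRange ((s.length : Int)) (-1) (-1)) with
      | some i => i + 1 | none => 0) := by
  cases hfh : pvFH (pvCF s p) (PySem.List.pyRange ((s.length : Int)) (-1) (-1)) with
  | some j =>
    obtain ⟨hjmem, _⟩ := pvFH_mem _ _ _ hfh
    rw [PySem.List.mem_pyRange_neg_one] at hjmem
    show (1 : Int) ≤ j + 1
    omega
  | none =>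
    exfalso
    have hnone := (pvFH_eq_none_iff _ _).1 hfh
    rcases hlow with h | h
    · have := hnone 0 (by rw [PySem.List.mem_pyRange_neg_one]; omega)
      rw [pvCF, show (0 : Int).toNat = 0 from rfl, List.drop_zero, h] at this
      exact absurd this (by simp)
    · have := hnone 1 (by rw [PySem.List.mem_pyRange_neg_one]; omega)
      rw [pvCF, show (1 : Int).toNat = 1 from rfl, h] at this
      exact absurd this (by simp)

theorem main_exact (s p : List Char) (hn : 3 ≤ s.length) (hp : p ≠ [])
    (hD : (∃ i : Nat, i < s.length ∧ 2 ≤ i ∧ s.length < i + p.length ∧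
          s[i]? = p[0]? ∧ s.drop i = p.drop (p.length - (s.length - i))) ∨
        ((∀ i : Nat, i < s.length → 2 ≤ i → ¬ p.isPrefixOf (s.drop i)) ∧
         (p.isPrefixOf s ∨ p.isPrefixOf (s.drop 1)))) :
    pyA_outer s p (PySem.List.pyRange ((s.length : Int) - 1) 1 (-1)) ≠
      (PySem.List.pyRange 0 ((s.length : Int) - (p.length : Int) + 1) 1).foldl
      (fun last i =>
        if PySem.List.pyGet? s i = PySem.List.pyGet? p 0 ∧
           pyB_startswithAt s p i = true then i else last) (-1) + 1 := by
  have hm : 0 < p.length := List.length_pos_of_ne_nil hp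
  rw [A_characterized s p hn hp, B_characterized s p hp]
  have hBle := B_le s p hm
  generalize hB : (match pvFH (pvCF s p) (PySem.List.pyRange ((s.length : Int)) (-1) (-1)) with
      | some i => i + 1 | none => 0) = B at hBle ⊢
  by_cases hc1 : ∃ i : Nat, i < s.length ∧ 2 ≤ i ∧ s.length < i + p.length ∧
      s[i]? = p[0]? ∧ s.drop i = p.drop (p.length - (s.length - i))
  · -- clause 1: the tail scan fires, A ≥ n - m + 2 and A ≥ 3, both above B
    obtain ⟨i, hilt, hi2, hov, hcfst, hcsfx⟩ := hc1
    have hCT : pvCT s p ((s.length : Int)) ((p.length : Int)) (i : Int) = true := by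
      rw [pvCT_iff s p (i : Int) (by omega) (by omega) (by omega), Int.toNat_natCast]
      exact ⟨hcfst, hcsfx⟩
    cases hfh : pvFH (pvCT s p ((s.length : Int)) ((p.length : Int)))
        (PySem.List.pyRange ((s.length : Int) - 1)
          (max 1 ((s.length : Int) - (p.length : Int))) (-1)) with
    | none =>
      have := (pvFH_eq_none_iff _ _).1 hfh (i : Int)
        (by rw [PySem.List.mem_pyRange_neg_one]; omega)
      rw [hCT] at this; exact absurd this (by simp)
    | some j =>
      obtain ⟨hjmem, _⟩ := pvFH_mem _ _ _ hfh
      rw [PySem.List.mem_pyRange_neg_one] at hjmem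
      show j + 1 ≠ B
      omega
  · -- ¬ clause 1, so hD gives clause 2: A = 0 while B ≥ 1
    obtain ⟨hall, hlow⟩ : (∀ i : Nat, i < s.length → 2 ≤ i → ¬ p.isPrefixOf (s.drop i)) ∧
        (p.isPrefixOf s ∨ p.isPrefixOf (s.drop 1)) := hD.resolve_left hc1
    have htail : pvFH (pvCT s p ((s.length : Int)) ((p.length : Int)))
        (PySem.List.pyRange ((s.length : Int) - 1)
          (max 1 ((s.length : Int) - (p.length : Int))) (-1)) = none := by
      rw [pvFH_eq_none_iff]
      intro j hj
      rw [PySem.List.mem_pyRange_neg_one] at hj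
      by_contra hcon
      rw [Bool.not_eq_false, pvCT_iff s p j (by omega) (by omega) (by omega)] at hcon
      exact hc1 ⟨j.toNat, by omega, by omega, by omega, hcon.1, hcon.2⟩
    have hmid : pvFH (pvCF s p)
        (PySem.List.pyRange (max 1 ((s.length : Int) - (p.length : Int))) 1 (-1)) = none := by
      rw [pvFH_eq_none_iff]
      intro j hj
      rw [PySem.List.mem_pyRange_neg_one] at hj
      by_contra hcon
      rw [Bool.not_eq_false, pvCF] at hcon
      have hfit := pvCF_le s p j hm (by rw [pvCF]; exact hcon)
      exact hall j.toNat (by omega) (by omega) hcon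
    rw [htail, hmid]
    have hBpos := B_pos s p hn hlow
    rw [hB] at hBpos
    show (0 : Int) ≠ B
    omega

-- ===== VERDICT (by name: the statements are the Claim_ definitions above) =====
theorem find_last_match_spec : Claim_unchanged_find_last_match := by
  intro input_str pattern _ hpre
  unfold Spec_find_last_match find_last_match find_last_match_alt
  intro hD
  unfold D_find_last_match at hD
  exact main_unchanged input_str.toList pattern.toList hpre.1 hpre.2 hD

theorem find_last_match_changed : Claim_changed_find_last_match := by
  unfold Claim_changed_find_last_match; decide

theorem find_last_match_tight : Claim_exact_find_last_match := by
  intro input_str pattern _ hpre hD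
  unfold find_last_match find_last_match_alt
  unfold D_find_last_match at hD
  exact main_exact input_str.toList pattern.toList hpre.1 hpre.2 hD
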